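-- pv_equiv track=rewrite | github.com/brightseth/vibe | streak_analytics.py | _get_streak_buckets
-- ===== SOURCE A (Python) =====
-- def _get_streak_buckets(streaks):
--     """Categorize streaks into buckets"""
--     buckets = {
--         '1-3 days': 0,
--         '4-7 days': 0,
--         '8-14 days': 0,
--         '15-30 days': 0,
--         '31+ days': 0
--     }
--
--     for streak in streaks:
--         if 1 <= streak <= 3:
--             buckets['1-3 days'] += 1
--         elif 4 <= streak <= 7:
--             buckets['4-7 days'] += 1
--         elif 8 <= streak <= 14:
--             buckets['8-14 days'] += 1
--         elif 15 <= streak <= 30: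
--             buckets['15-30 days'] += 1
--         elif streak >= 31:
--             buckets['31+ days'] += 1
--
--     return buckets
-- ===== SOURCE B (Python) =====
-- def _get_streak_buckets(streaks):
--     """Categorize streaks into buckets"""
--     return {
--         '1-3 days': sum(1 for s in streaks if 1 <= s <= 3),
--         '4-7 days': sum(1 for s in streaks if 4 <= s <= 7),
--         '8-14 days': sum(1 for s in streaks if 8 <= s <= 14),
--         '15-30 days': sum(1 for s in streaks if 15 <= s <= 30),
--         '31+ days': sum(1 for s in streaks if s >= 31),
--     }
-- ===== Notes on version B (the rewrite author's own statement) =====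
-- stated objective: simpler
-- what changed: Replaces the single loop with an elif chain mutating a dict by five independent filtered counts, one per bucket, assembled directly into the result dict.
import Mathlib
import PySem

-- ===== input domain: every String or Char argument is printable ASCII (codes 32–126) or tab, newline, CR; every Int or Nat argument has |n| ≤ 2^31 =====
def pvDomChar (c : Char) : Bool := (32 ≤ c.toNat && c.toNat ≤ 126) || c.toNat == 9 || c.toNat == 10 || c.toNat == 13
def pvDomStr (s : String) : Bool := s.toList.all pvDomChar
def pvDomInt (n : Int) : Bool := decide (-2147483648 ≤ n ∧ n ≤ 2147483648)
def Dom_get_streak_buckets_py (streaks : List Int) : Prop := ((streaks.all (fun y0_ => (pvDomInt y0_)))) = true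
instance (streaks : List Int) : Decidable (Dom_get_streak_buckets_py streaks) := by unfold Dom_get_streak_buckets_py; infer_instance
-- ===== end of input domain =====

-- B replaces A's single loop with an elif chain over a mutable dict by five
-- independent per-bucket counts assembled directly into the result (objective: simpler).

-- ===== PORT A =====
-- the loop body: the elif chain incrementing the matching bucket of the dict
def bucketStep (b : PySem.Dict String Int) (streak : Int) : PySem.Dict String Int :=
  if 1 ≤ streak ∧ streak ≤ 3 then b.insert "1-3 days" (b.getD "1-3 days" 0 + 1)
  else if 4 ≤ streak ∧ streak ≤ 7 then b.insert "4-7 days" (b.getD "4-7 days" 0 + 1)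
  else if 8 ≤ streak ∧ streak ≤ 14 then b.insert "8-14 days" (b.getD "8-14 days" 0 + 1)
  else if 15 ≤ streak ∧ streak ≤ 30 then b.insert "15-30 days" (b.getD "15-30 days" 0 + 1)
  else if 31 ≤ streak then b.insert "31+ days" (b.getD "31+ days" 0 + 1)
  else b

def get_streak_buckets_py (streaks : List Int) : List (String × Int) :=
  (streaks.foldl bucketStep
    (PySem.Dict.ofList
      [("1-3 days", 0), ("4-7 days", 0), ("8-14 days", 0), ("15-30 days", 0), ("31+ days", 0)])).items

-- ===== PORT B =====
def get_streak_buckets_py_alt (streaks : List Int) : List (String × Int) :=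
  [("1-3 days", (streaks.countP (fun s => decide (1 ≤ s ∧ s ≤ 3)) : Int)),
   ("4-7 days", (streaks.countP (fun s => decide (4 ≤ s ∧ s ≤ 7)) : Int)),
   ("8-14 days", (streaks.countP (fun s => decide (8 ≤ s ∧ s ≤ 14)) : Int)),
   ("15-30 days", (streaks.countP (fun s => decide (15 ≤ s ∧ s ≤ 30)) : Int)),
   ("31+ days", (streaks.countP (fun s => decide (31 ≤ s)) : Int))]

-- ===== PRECONDITION & SPEC =====
def Spec_get_streak_buckets_py (streaks : List Int) (out : List (String × Int)) : Prop := out = get_streak_buckets_py_alt streaks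
instance (streaks : List Int) (out : List (String × Int)) : Decidable (Spec_get_streak_buckets_py streaks out) := by unfold Spec_get_streak_buckets_py; infer_instance

-- ===== CLAIM (what is proved, stated in full; the proofs are below) =====
def Claim_equal_get_streak_buckets_py : Prop := ∀ (streaks : List Int), Dom_get_streak_buckets_py streaks → Spec_get_streak_buckets_py streaks (get_streak_buckets_py streaks)

-- ===== LEMMAS AND PROOFS =====
theorem foldl_bucketStep (l : List Int) (a b c d e : Int) :
    (l.foldl bucketStep
      (PySem.Dict.mk
        [("1-3 days", a), ("4-7 days", b), ("8-14 days", c), ("15-30 days", d), ("31+ days", e)])).items =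
    [("1-3 days", a + (l.countP (fun s => decide (1 ≤ s ∧ s ≤ 3)) : Int)),
     ("4-7 days", b + (l.countP (fun s => decide (4 ≤ s ∧ s ≤ 7)) : Int)),
     ("8-14 days", c + (l.countP (fun s => decide (8 ≤ s ∧ s ≤ 14)) : Int)),
     ("15-30 days", d + (l.countP (fun s => decide (15 ≤ s ∧ s ≤ 30)) : Int)),
     ("31+ days", e + (l.countP (fun s => decide (31 ≤ s)) : Int))] := by
  induction l generalizing a b c d e with
  | nil => simp
  | cons x l ih =>
    simp only [List.foldl_cons, List.countP_cons, bucketStep]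
    by_cases h1 : 1 ≤ x ∧ x ≤ 3 <;>
    by_cases h2 : 4 ≤ x ∧ x ≤ 7 <;>
    by_cases h3 : 8 ≤ x ∧ x ≤ 14 <;>
    by_cases h4 : 15 ≤ x ∧ x ≤ 30 <;>
    by_cases h5 : 31 ≤ x <;>
      (simp [h1, h2, h3, h4, h5, ih, PySem.Dict.insert, PySem.Dict.getD,
             PySem.Dict.get?, PySem.Dict.contains]
       try omega)

-- ===== VERDICT (by name: the statement is the Claim_ definition above) =====
theorem get_streak_buckets_py_spec : Claim_equal_get_streak_buckets_py := by
  intro streaks _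
  show _ = _
  simp [get_streak_buckets_py, get_streak_buckets_py_alt, PySem.Dict.ofList]
  simpa using foldl_bucketStep streaks 0 0 0 0 0
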